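-- pv_equiv track=rewrite | github.com/andrewstellman/octobatch | scripts/tui/utils/status.py | determine_step_status
-- ===== SOURCE A (Python) =====
-- def determine_step_status(
--     step_index: int,
--     chunk_states: list[tuple[str, int]]
-- ) -> str:
--     """
--     Determine a pipeline step's status from chunk state information.
--
--     Args:
--         step_index: Index of this step in the pipeline
--         chunk_states: List of (status, chunk_step_idx) tuples from parse_chunk_state
--
--     Returns:
--         "complete" - All chunks have passed this step
--         "in_progress" - At least one chunk is at this step
--         "pending" - No chunks have reached this step yet
--     """
--     if not chunk_states:
--         return "pending"
--
--     has_in_progress = False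
--     all_complete = True
--
--     for status, chunk_step_idx in chunk_states:
--         if status == "complete":
--             # Chunk is VALIDATED - all steps complete
--             continue
--         elif status == "in_progress":
--             if chunk_step_idx == step_index:
--                 # Chunk is currently at this step
--                 has_in_progress = True
--                 all_complete = False
--             elif chunk_step_idx > step_index:
--                 # Chunk has passed this step
--                 continue
--             else:
--                 # Chunk hasn't reached this step yet
--                 all_complete = False
--         else:
--             # status == "pending" - chunk hasn't started
--             all_complete = False
--
--     if all_complete:
--         return "complete"
--     elif has_in_progress:
--         return "in_progress"
--     else:
--         # Check if any chunk has passed this step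
--         for status, chunk_step_idx in chunk_states:
--             if status == "complete" or chunk_step_idx > step_index:
--                 return "complete"
--         return "pending"
-- ===== SOURCE B (Python) =====
-- def determine_step_status(
--     step_index: int,
--     chunk_states: list[tuple[str, int]]
-- ) -> str:
--     # The all-passed check of the original is redundant: if every chunk has
--     # passed this step, no chunk is at it and some chunk satisfies the
--     # "passed" test, so two early-return scans suffice.
--     if not chunk_states:
--         return "pending"
--     for status, chunk_step_idx in chunk_states:
--         if status == "in_progress" and chunk_step_idx == step_index:
--             return "in_progress"
--     for status, chunk_step_idx in chunk_states:
--         if status == "complete" or chunk_step_idx > step_index: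
--             return "complete"
--     return "pending"
-- ===== Notes on version B (the rewrite author's own statement) =====
-- stated objective: simpler
-- what changed: Proved the all-passed predicate redundant (all passed implies no chunk is at the step and some chunk satisfies the passed test), reducing the flag-mutating pass plus conditional rescan to two early-return scans checked in a different priority order.
import Mathlib
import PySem

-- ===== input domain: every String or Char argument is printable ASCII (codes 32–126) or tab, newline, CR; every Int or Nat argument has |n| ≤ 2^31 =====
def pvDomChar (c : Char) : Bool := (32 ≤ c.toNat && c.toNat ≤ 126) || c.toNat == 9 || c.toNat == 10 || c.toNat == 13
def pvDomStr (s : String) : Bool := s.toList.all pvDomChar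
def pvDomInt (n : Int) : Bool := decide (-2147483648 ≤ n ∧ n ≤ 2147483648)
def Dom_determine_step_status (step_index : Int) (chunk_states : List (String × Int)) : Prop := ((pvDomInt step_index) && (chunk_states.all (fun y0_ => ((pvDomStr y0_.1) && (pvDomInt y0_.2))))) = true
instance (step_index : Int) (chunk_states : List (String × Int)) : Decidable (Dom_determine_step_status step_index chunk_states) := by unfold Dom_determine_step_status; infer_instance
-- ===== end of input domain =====

-- ===== PORT A =====
-- B drops A's redundant all-passed flag pass and uses two early-return scans (objective: simpler).
def determine_step_status (step_index : Int) (chunk_states : List (String × Int)) : String :=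
  if chunk_states = [] then "pending"
  else
    let st := chunk_states.foldl
      (fun (p : Bool × Bool) sc =>
        if sc.1 = "complete" then p
        else if sc.1 = "in_progress" then
          if sc.2 = step_index then (true, false)
          else if step_index < sc.2 then p
          else (p.1, false)
        else (p.1, false))
      (false, true)
    if st.2 then "complete"
    else if st.1 then "in_progress"
    else
      match chunk_states.find? (fun sc => sc.1 == "complete" || decide (step_index < sc.2)) with
      | some _ => "complete"
      | none => "pending"

-- ===== PORT B =====
-- B's first early-return loop: is any chunk currently at this step?
def scan_at (step_index : Int) : List (String × Int) → Bool
  | [] => false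
  | sc :: rest =>
    if sc.1 = "in_progress" ∧ sc.2 = step_index then true else scan_at step_index rest

-- B's second early-return loop: has any chunk passed this step?
def scan_passed (step_index : Int) : List (String × Int) → Bool
  | [] => false
  | sc :: rest =>
    if sc.1 = "complete" ∨ step_index < sc.2 then true else scan_passed step_index rest

def determine_step_status_alt (step_index : Int) (chunk_states : List (String × Int)) : String :=
  if chunk_states = [] then "pending"
  else if scan_at step_index chunk_states then "in_progress"
  else if scan_passed step_index chunk_states then "complete"
  else "pending"

-- ===== PRECONDITION & SPEC =====
def Spec_determine_step_status (step_index : Int) (chunk_states : List (String × Int)) (out : String) : Prop := out = determine_step_status_alt step_index chunk_states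
instance (step_index : Int) (chunk_states : List (String × Int)) (out : String) : Decidable (Spec_determine_step_status step_index chunk_states out) := by unfold Spec_determine_step_status; infer_instance

-- ===== CLAIM (what is proved, stated in full; the proofs are below) =====
def Claim_equal_determine_step_status : Prop := ∀ (step_index : Int) (chunk_states : List (String × Int)), Dom_determine_step_status step_index chunk_states → Spec_determine_step_status step_index chunk_states (determine_step_status step_index chunk_states)

-- ===== LEMMAS AND PROOFS =====
-- Characterise A's flag-accumulating fold: first flag = "some chunk at this step",
-- second flag = "every chunk has passed this step".
theorem dss_foldl_char (step_index : Int) (cs : List (String × Int)) : ∀ h a : Bool,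
    cs.foldl
      (fun (p : Bool × Bool) sc =>
        if sc.1 = "complete" then p
        else if sc.1 = "in_progress" then
          if sc.2 = step_index then (true, false)
          else if step_index < sc.2 then p
          else (p.1, false)
        else (p.1, false))
      (h, a)
    = (h || cs.any (fun sc => sc.1 == "in_progress" && sc.2 == step_index),
       a && cs.all (fun sc => sc.1 == "complete" || (sc.1 == "in_progress" && decide (step_index < sc.2)))) := by
  induction cs with
  | nil => simp
  | cons x xs ih =>
    intro h a
    simp only [List.foldl_cons, List.any_cons, List.all_cons]
    by_cases h1 : x.1 = "complete"
    · simp [h1, ih]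
    · by_cases h2 : x.1 = "in_progress"
      · by_cases h3 : x.2 = step_index
        · simp [h2, h3, ih]
        · have h3' : (x.2 == step_index) = false := beq_eq_false_iff_ne.mpr h3
          by_cases h4 : step_index < x.2
          · simp [h2, h3, h3', h4, ih]
          · simp [h2, h3, h3', h4, ih]
      · have h2' : (x.1 == "in_progress") = false := beq_eq_false_iff_ne.mpr h2
        simp [h1, h2, h2', ih]

theorem scan_at_eq_any (step_index : Int) (cs : List (String × Int)) :
    scan_at step_index cs = cs.any (fun sc => sc.1 == "in_progress" && sc.2 == step_index) := by
  induction cs with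
  | nil => rfl
  | cons x xs ih =>
    simp only [scan_at, List.any_cons, ih]
    by_cases h : x.1 = "in_progress" ∧ x.2 = step_index
    · simp [h.1, h.2]
    · rw [if_neg h]
      rcases not_and_or.mp h with h1 | h2
      · simp [beq_eq_false_iff_ne.mpr h1]
      · simp [beq_eq_false_iff_ne.mpr h2]

theorem scan_passed_eq_any (step_index : Int) (cs : List (String × Int)) :
    scan_passed step_index cs = cs.any (fun sc => sc.1 == "complete" || decide (step_index < sc.2)) := by
  induction cs with
  | nil => rfl
  | cons x xs ih =>
    simp only [scan_passed, List.any_cons, ih]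
    by_cases h : x.1 = "complete" ∨ step_index < x.2
    · rcases h with h1 | h2
      · simp [h1]
      · simp [h2]
    · rw [if_neg h]
      push Not at h
      simp [beq_eq_false_iff_ne.mpr h.1, h.2]

-- If every chunk has passed, none is at this step.
theorem all_passed_no_at (step_index : Int) (cs : List (String × Int))
    (h : cs.all (fun sc => sc.1 == "complete" || (sc.1 == "in_progress" && decide (step_index < sc.2))) = true) :
    cs.any (fun sc => sc.1 == "in_progress" && sc.2 == step_index) = false := by
  rw [List.any_eq_false]
  intro x hx
  have hx' := List.all_eq_true.mp h x hx
  simp only [Bool.or_eq_true, beq_iff_eq, Bool.and_eq_true, decide_eq_true_eq] at hx' ⊢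
  rintro ⟨h1, h2⟩
  rcases hx' with hc | ⟨_, hlt⟩
  · simp [h1] at hc
  · omega

-- If every chunk has passed and the list is nonempty, some chunk satisfies the passed test.
theorem all_passed_some_passer (step_index : Int) (cs : List (String × Int)) (hne : cs ≠ [])
    (h : cs.all (fun sc => sc.1 == "complete" || (sc.1 == "in_progress" && decide (step_index < sc.2))) = true) :
    cs.any (fun sc => sc.1 == "complete" || decide (step_index < sc.2)) = true := by
  rcases cs with _ | ⟨x, xs⟩
  · exact absurd rfl hne
  · rw [List.any_eq_true]
    refine ⟨x, List.mem_cons_self, ?_⟩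
    have hx' := List.all_eq_true.mp h x List.mem_cons_self
    simp only [Bool.or_eq_true, beq_iff_eq, Bool.and_eq_true, decide_eq_true_eq] at hx' ⊢
    rcases hx' with hc | ⟨_, hlt⟩
    · exact Or.inl hc
    · exact Or.inr hlt

theorem dss_find?_any (step_index : Int) (cs : List (String × Int)) :
    (match cs.find? (fun sc => sc.1 == "complete" || decide (step_index < sc.2)) with
     | some _ => "complete"
     | none => "pending")
    = (if cs.any (fun sc => sc.1 == "complete" || decide (step_index < sc.2)) then "complete" else "pending") := by
  cases hf : cs.find? (fun sc => sc.1 == "complete" || decide (step_index < sc.2)) with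
  | none =>
    have : ¬ cs.any (fun sc => sc.1 == "complete" || decide (step_index < sc.2)) = true := by
      simp only [List.any_eq_true]
      rintro ⟨x, hx, hp⟩
      have := List.find?_eq_none.mp hf x hx
      simp_all
    simp [this]
  | some y =>
    have hy := List.find?_some hf
    have hmem := List.mem_of_find?_eq_some hf
    have : cs.any (fun sc => sc.1 == "complete" || decide (step_index < sc.2)) = true :=
      List.any_eq_true.mpr ⟨y, hmem, hy⟩
    simp [this]

-- ===== VERDICT (by name: the statement is the Claim_ definition above) =====
theorem determine_step_status_spec : Claim_equal_determine_step_status := by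
  intro step_index cs _
  unfold Spec_determine_step_status determine_step_status determine_step_status_alt
  by_cases hnil : cs = []
  · simp [hnil]
  · simp only [hnil, if_false]
    rw [dss_foldl_char, scan_at_eq_any, scan_passed_eq_any, dss_find?_any]
    by_cases hall : cs.all (fun sc => sc.1 == "complete" || (sc.1 == "in_progress" && decide (step_index < sc.2))) = true
    · have hnoat := all_passed_no_at step_index cs hall
      have hpass := all_passed_some_passer step_index cs hnil hall
      simp [hall, hnoat, hpass]
    · by_cases hany : cs.any (fun sc => sc.1 == "in_progress" && sc.2 == step_index) = true
      · simp [hall, hany]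
      · simp [hall, hany]
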